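-- pv_equiv track=rewrite | github.com/Rajnishkumar000/DataScience | arpit/operations.py | solution
-- ===== SOURCE A (Python) =====
-- def binary_search(arr, x):
--     left, right = 0, len(arr) - 1
--     while left <= right:
--         mid = (left + right) // 2
--         if arr[mid] <= x:
--             left = mid + 1
--         else:
--             right = mid - 1
--     return left
--
-- def solution(operations):
--     obstacles = set()  # Set to keep track of obstacle positions
--     result = []  # List to store the binary results
--     obstacles_list = []
--
--     for op in operations:
--         if op[0] == 1:
--             # Operation type 1: Build an obstacle at coordinate x
--             x = op[1]
--             obstacles.add(x)
--             obstacles_list.append(x)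
--             obstacles_list.sort()
--         elif op[0] == 2:
--             # Operation type 2: Check if a block of size 'size' can be built ending just before coordinate x
--             x = op[1]
--             size = op[2]
--
--             possible = True
--             index = binary_search(obstacles_list, x - size + 1) - 1
--             if index >= 0 and obstacles_list[index] >= x - size + 1:
--                 possible = False
--             result.append('1' if possible else '0')
--     return ''.join(result)
-- ===== SOURCE B (Python) =====
-- def solution(operations):
--     obstacles = set()
--     result = []
--     for op in operations:
--         if op[0] == 1:
--             obstacles.add(op[1])
--         elif op[0] == 2:
--             result.append('1' if (op[1] - op[2] + 1) not in obstacles else '0')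
--     return ''.join(result)
-- ===== Notes on version B (the rewrite author's own statement) =====
-- stated objective: simpler
-- what changed: A's sorted obstacle list, per-insert sort and hand-written binary search reduce to a pure set-membership test of x-size+1, so B keeps only a set of obstacles and drops the list, the sorting and the binary_search helper entirely.
import Mathlib
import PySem

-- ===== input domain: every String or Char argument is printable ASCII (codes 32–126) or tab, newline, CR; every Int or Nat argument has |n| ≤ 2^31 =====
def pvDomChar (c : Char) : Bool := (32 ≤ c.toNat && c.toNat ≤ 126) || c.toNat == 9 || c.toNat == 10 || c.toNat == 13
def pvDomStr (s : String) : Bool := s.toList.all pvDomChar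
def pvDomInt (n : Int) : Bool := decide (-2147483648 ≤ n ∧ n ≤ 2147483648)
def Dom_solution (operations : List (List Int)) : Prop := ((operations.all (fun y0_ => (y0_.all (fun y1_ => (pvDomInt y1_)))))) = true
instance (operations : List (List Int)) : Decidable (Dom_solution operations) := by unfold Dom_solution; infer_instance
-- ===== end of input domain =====

-- B replaces A's sorted obstacle list + per-insert sort + hand-written binary search by a single
-- set-membership test of x-size+1 (simpler; the query reduces to exact membership).

-- ===== PORT A =====
-- the while-loop of binary_search; arr[mid] is always in range on reachable states, pyGetD 0 is the access
def bsLoop (arr : List Int) (x : Int) (left right : Int) : Int :=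
  if h : left ≤ right then
    let mid := PySem.Int.floordiv (left + right) 2
    if PySem.List.pyGetD arr mid 0 ≤ x then bsLoop arr x (mid + 1) right
    else bsLoop arr x left (mid - 1)
  else left
termination_by (right + 1 - left).toNat
decreasing_by
  · have := PySem.Int.floordiv_two_mid_bounds h; omega
  · have := PySem.Int.floordiv_two_mid_bounds h; omega

def binarySearch (arr : List Int) (x : Int) : Int :=
  bsLoop arr x 0 ((arr.length : Int) - 1)

-- one iteration of A's for-loop; state = (obstacles, obstacles_list, result)
def stepA (st : PySem.Set Int × List Int × List String) (op : List Int) :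
    PySem.Set Int × List Int × List String :=
  if PySem.List.pyGetD op 0 0 = 1 then
    let x := PySem.List.pyGetD op 1 0
    (st.1.add x, PySem.List.sorted (st.2.1 ++ [x]) (fun a => a), st.2.2)
  else if PySem.List.pyGetD op 0 0 = 2 then
    let x := PySem.List.pyGetD op 1 0
    let size := PySem.List.pyGetD op 2 0
    let index := binarySearch st.2.1 (x - size + 1) - 1
    -- possible = ¬(index ≥ 0 ∧ obstacles_list[index] ≥ x - size + 1)
    (st.1, st.2.1,
      st.2.2 ++ [if 0 ≤ index ∧ x - size + 1 ≤ PySem.List.pyGetD st.2.1 index 0 then "0" else "1"])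
  else st

def solution (operations : List (List Int)) : String :=
  PySem.Str.join "" (operations.foldl stepA (PySem.Set.ofList [], [], [])).2.2

-- ===== PORT B =====
-- one iteration of B's for-loop; state = (obstacles, result)
def stepB (st : PySem.Set Int × List String) (op : List Int) : PySem.Set Int × List String :=
  if PySem.List.pyGetD op 0 0 = 1 then
    (st.1.add (PySem.List.pyGetD op 1 0), st.2)
  else if PySem.List.pyGetD op 0 0 = 2 then
    (st.1,
      st.2 ++ [if (PySem.List.pyGetD op 1 0 - PySem.List.pyGetD op 2 0 + 1) ∈ st.1 then "0" else "1"])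
  else st

def solution_alt (operations : List (List Int)) : String :=
  PySem.Str.join "" (operations.foldl stepB (PySem.Set.ofList [], [])).2

-- ===== PRECONDITION & SPEC =====
-- Pre_ excludes exactly the inputs on which A raises IndexError: an empty operation (op[0]),
-- a type-1 operation without its coordinate (op[1]), a type-2 operation missing op[1]/op[2].
def Pre_solution (operations : List (List Int)) : Prop :=
  ∀ op ∈ operations, op ≠ [] ∧ (op.headI = 1 → 2 ≤ op.length) ∧ (op.headI = 2 → 3 ≤ op.length)
instance (operations : List (List Int)) : Decidable (Pre_solution operations) := by
  unfold Pre_solution; infer_instance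
def pvWitness_solution : List (List Int) := [[1, 3], [2, 4, 2], [2, 5, 2], [7], [1, 5], [2, 6, 2]]
def Spec_solution (operations : List (List Int)) (out : String) : Prop := out = solution_alt operations
instance (operations : List (List Int)) (out : String) : Decidable (Spec_solution operations out) := by
  unfold Spec_solution; infer_instance

-- ===== CLAIM (what is proved, stated in full; the proofs are below) =====
def Claim_equal_solution : Prop := ∀ (operations : List (List Int)),
  Dom_solution operations → Pre_solution operations → Spec_solution operations (solution operations)

-- ===== LEMMAS AND PROOFS =====

-- loop invariant of A's binary search: the result splits arr into a prefix ≤ x and a suffix > x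
theorem bsLoop_spec (arr : List Int) (x : Int) (hs : arr.Pairwise (· ≤ ·))
    (left right : Int) (h0 : 0 ≤ left) (hlen : right < (arr.length : Int)) (hlr : left ≤ right + 1)
    (hpre : ∀ j : Nat, (j : Int) < left → arr.getD j 0 ≤ x)
    (hsuf : ∀ j : Nat, right < (j : Int) → j < arr.length → x < arr.getD j 0) :
    left ≤ bsLoop arr x left right ∧ bsLoop arr x left right ≤ right + 1 ∧
      (∀ j : Nat, (j : Int) < bsLoop arr x left right → arr.getD j 0 ≤ x) ∧
      (∀ j : Nat, bsLoop arr x left right ≤ (j : Int) → j < arr.length → x < arr.getD j 0) := by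
  rw [bsLoop]
  split
  · next h =>
    have hmid := PySem.Int.floordiv_two_mid_bounds h
    set mid := PySem.Int.floordiv (left + right) 2 with hmiddef
    have hmid0 : (0:Int) ≤ mid := by omega
    have hmidlt : mid < (arr.length : Int) := by omega
    simp only []
    rw [PySem.List.pyGetD_eq_getElem arr 0 hmid0 hmidlt]
    split
    · next hle =>
      have hpre' : ∀ j : Nat, (j : Int) < mid + 1 → arr.getD j 0 ≤ x := by
        intro j hj
        have hjlen : j < arr.length := by omega
        rw [List.getD_eq_getElem arr 0 hjlen]
        rcases lt_or_eq_of_le (show j ≤ mid.toNat by omega) with hlt | heq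
        · exact le_trans (List.pairwise_iff_getElem.mp hs j mid.toNat hjlen (by omega) hlt) hle
        · subst heq; exact hle
      obtain ⟨a1, a2, a3, a4⟩ := bsLoop_spec arr x hs (mid + 1) right (by omega) hlen (by omega) hpre' hsuf
      exact ⟨le_trans (by omega) a1, a2, a3, a4⟩
    · next hgt =>
      push Not at hgt
      have hsuf' : ∀ j : Nat, mid - 1 < (j : Int) → j < arr.length → x < arr.getD j 0 := by
        intro j hj hjlen
        rw [List.getD_eq_getElem arr 0 hjlen]
        rcases lt_or_eq_of_le (show mid.toNat ≤ j by omega) with hlt | heq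
        · exact lt_of_lt_of_le hgt (List.pairwise_iff_getElem.mp hs mid.toNat j (by omega) hjlen hlt)
        · subst heq; exact hgt
      obtain ⟨a1, a2, a3, a4⟩ := bsLoop_spec arr x hs left (mid - 1) h0 (by omega) (by omega) hpre hsuf'
      exact ⟨a1, le_trans a2 (by omega), a3, a4⟩
  · next h =>
    exact ⟨le_refl _, by omega, hpre, fun j hj hjlen => hsuf j (by omega) hjlen⟩
termination_by (right + 1 - left).toNat
decreasing_by
  · omega
  · omega

-- A's query test on a sorted list is exact membership of x-size+1
theorem bs_mem (arr : List Int) (t : Int) (hs : arr.Pairwise (· ≤ ·)) :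
    (0 ≤ binarySearch arr t - 1 ∧ t ≤ PySem.List.pyGetD arr (binarySearch arr t - 1) 0) ↔ t ∈ arr := by
  obtain ⟨h1, h2, hpre, hsuf⟩ :=
    bsLoop_spec arr t hs 0 ((arr.length : Int) - 1) (le_refl 0) (by omega) (by omega)
      (fun j hj => absurd hj (by omega)) (fun j hj hjlen => absurd hjlen (by omega))
  rw [show bsLoop arr t 0 ((arr.length : Int) - 1) = binarySearch arr t from rfl] at h1 h2 hpre hsuf
  constructor
  · rintro ⟨hL, hget⟩
    have hlt : binarySearch arr t - 1 < (arr.length : Int) := by omega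
    rw [PySem.List.pyGetD_eq_getElem arr 0 hL hlt] at hget
    have hle := hpre (binarySearch arr t - 1).toNat (by omega)
    rw [List.getD_eq_getElem arr 0 (by omega)] at hle
    exact (le_antisymm hle hget) ▸ List.getElem_mem _
  · intro hmem
    obtain ⟨j, hjlen, hj⟩ := List.mem_iff_getElem.mp hmem
    have hjL : (j : Int) < binarySearch arr t := by
      by_contra hc
      push Not at hc
      have := hsuf j hc hjlen
      rw [List.getD_eq_getElem arr 0 hjlen, hj] at this
      omega
    refine ⟨by omega, ?_⟩
    rw [PySem.List.pyGetD_eq_getElem arr 0 (by omega) (by omega)]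
    rcases lt_or_eq_of_le (show j ≤ (binarySearch arr t - 1).toNat by omega) with hlt | heq
    · have hp := List.pairwise_iff_getElem.mp hs j ((binarySearch arr t - 1).toNat) hjlen (by omega) hlt
      rw [hj] at hp
      exact hp
    · subst heq; exact le_of_eq hj.symm

theorem foldl_inv (ops : List (List Int))
    (sA : PySem.Set Int × List Int × List String) (sB : PySem.Set Int × List String)
    (hres : sA.2.2 = sB.2) (hsorted : sA.2.1.Pairwise (· ≤ ·))
    (hmem : ∀ t : Int, t ∈ sA.2.1 ↔ t ∈ sB.1) :
    (ops.foldl stepA sA).2.2 = (ops.foldl stepB sB).2 := by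
  induction ops generalizing sA sB with
  | nil => exact hres
  | cons op rest ih =>
    simp only [List.foldl_cons]
    apply ih
    · unfold stepA stepB
      split
      · next =>
        simp [hres]
      · split
        · next =>
          simp only []
          rw [hres]
          congr 2
          by_cases hc : 0 ≤ binarySearch sA.2.1 (PySem.List.pyGetD op 1 0 - PySem.List.pyGetD op 2 0 + 1) - 1 ∧
              PySem.List.pyGetD op 1 0 - PySem.List.pyGetD op 2 0 + 1 ≤
                PySem.List.pyGetD sA.2.1 (binarySearch sA.2.1 (PySem.List.pyGetD op 1 0 - PySem.List.pyGetD op 2 0 + 1) - 1) 0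
          · rw [if_pos hc, if_pos (((hmem _).mp ((bs_mem _ _ hsorted).mp hc)))]
          · rw [if_neg hc, if_neg (fun hm => hc ((bs_mem _ _ hsorted).mpr ((hmem _).mpr hm)))]
        · next => exact hres
    · unfold stepA
      split
      · exact PySem.List.sorted_pairwise _ _
      · split
        · exact hsorted
        · exact hsorted
    · intro t
      unfold stepA stepB
      split
      · next =>
        simp only [PySem.List.mem_sorted, List.mem_append, List.mem_singleton, PySem.Set.mem_add]
        rw [hmem t]
      · split
        · exact hmem t
        · exact hmem t

-- ===== VERDICT (by name: the statement is the Claim_ definition above) =====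
theorem solution_spec : Claim_equal_solution := by
  intro ops _ _
  unfold Spec_solution solution solution_alt
  congr 1
  exact foldl_inv ops _ _ rfl (by simp) (by simp)
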